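-- pv_equiv track=rewrite | github.com/threefoldtecharchive/jumpscaleXI_core | jumpscale11/data/text/Text.py | text_strip_to_ascii_dense
-- ===== SOURCE A (Python) =====
-- from builtins import str
--
-- def text_strip_to_ascii_dense(text):
--     """
--     convert to ascii converting as much as possibe to ascii
--     replace -,:... to _
--     lower the text
--     remove all the other parts
--
--     """
--     # text = unidecode(text)  # convert to ascii letters
--     # text=j.core.tools.strip_to_ascii(text) #happens later already
--     text = text.lower()
--     text = text.replace("\n", "")
--     text = text.replace("\t", "")
--     text = text.replace(" ", "")
--
--     def replace(char):
--         if char in "-/\\= ;!+()":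
--             return "_"
--         return char
--
--     def check(char):
--         charnr = ord(char)
--         if char in "._":
--             return True
--         if charnr > 47 and charnr < 58:
--             return True
--         if charnr > 96 and charnr < 123:
--             return True
--         return False
--
--     res = [replace(char) for char in str(text)]
--     res = [char for char in res if check(char)]
--     text = "".join(res)
--     while "__" in text:
--         text = text.replace("__", "_")
--     text = text.rstrip("_")
--     return text
-- ===== SOURCE B (Python) =====
-- def text_strip_to_ascii_dense(text):
--     out = []
--     for ch in text.lower():
--         if ch in "\n\t ":
--             continue
--         if ch == "_" or ch in "-/\\=;!+()":
--             if not out or out[-1] != "_":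
--                 out.append("_")
--         elif ch == "." or "0" <= ch <= "9" or "a" <= ch <= "z":
--             out.append(ch)
--     return "".join(out).rstrip("_")
-- ===== Notes on version B (the rewrite author's own statement) =====
-- stated objective: alternative
-- what changed: Replaced A's multi-pass pipeline (three replace passes, two comprehensions, a repeated '__'->'_' replace loop, final rstrip) by a single streaming pass that filters, maps and collapses consecutive underscores on the fly.
import Mathlib
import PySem

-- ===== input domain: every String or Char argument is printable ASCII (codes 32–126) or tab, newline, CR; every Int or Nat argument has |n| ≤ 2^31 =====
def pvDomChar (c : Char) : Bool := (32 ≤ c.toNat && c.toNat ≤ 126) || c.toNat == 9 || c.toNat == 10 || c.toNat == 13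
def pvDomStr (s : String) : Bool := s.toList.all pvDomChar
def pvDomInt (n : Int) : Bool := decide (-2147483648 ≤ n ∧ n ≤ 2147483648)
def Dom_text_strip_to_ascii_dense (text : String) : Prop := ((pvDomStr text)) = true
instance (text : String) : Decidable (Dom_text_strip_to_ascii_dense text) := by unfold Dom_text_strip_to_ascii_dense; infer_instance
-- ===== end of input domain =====

-- B replaces A's multi-pass pipeline (three replace passes, two comprehensions, repeated "__"->"_" replacing) by one streaming pass that collapses underscores on the fly; same return value.


-- ===== PORT A =====
-- pvRep2 and the lemmas up to pvCollapse_dec exist only to justify TERMINATION of the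
-- while-loop port pvCollapse (cited by name in its decreasing_by); they do not change what it computes.
def pvRep2 : List Char → List Char
  | [] => []
  | '_' :: '_' :: t => '_' :: pvRep2 t
  | c :: t => c :: pvRep2 t

theorem pvRep2_cons (c : Char) (t : List Char) (h : ¬ (['_', '_'] <+: c :: t)) :
    pvRep2 (c :: t) = c :: pvRep2 t := by
  rw [pvRep2.eq_def]
  split
  · simp_all
  · rename_i t' heq
    exfalso; apply h
    rw [List.cons.injEq] at heq
    obtain ⟨rfl, rfl⟩ := heq
    exact ⟨t', rfl⟩
  · rename_i heq
    injection heq with h1 h2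
    subst h1; subst h2; rfl

theorem pv_go_rep2 (fuel : Nat) (l acc : List Char) (h : l.length ≤ fuel) :
    PySem.Chars.replace.go ['_', '_'] ['_'] fuel l acc = acc.reverse ++ pvRep2 l := by
  induction fuel generalizing l acc with
  | zero =>
    have hl : l = [] := by cases l <;> simp_all
    subst hl; simp [PySem.Chars.replace.go, pvRep2]
  | succ n ih =>
    cases l with
    | nil => simp [PySem.Chars.replace.go, pvRep2]
    | cons c t =>
      rw [PySem.Chars.replace.go]
      by_cases hp : ['_', '_'] <+: c :: t
      · obtain ⟨u, hu⟩ := hp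
        simp only [List.cons_append, List.nil_append, List.cons.injEq] at hu
        obtain ⟨hc, ht⟩ := hu
        subst hc
        subst ht
        have hpre : List.isPrefixOf ['_', '_'] ('_' :: '_' :: u) = true := by
          simp [List.isPrefixOf_iff_prefix]
        rw [if_pos hpre]
        have hu2 : u.length ≤ n := by simp at h; omega
        simp only [List.length_cons, List.drop_succ_cons, List.drop_zero, List.reverse_singleton]
        rw [show (List.drop ([] : List Char).length u) = u from rfl]
        rw [ih _ _ hu2]
        simp [pvRep2]
      · have hpre : ¬ (List.isPrefixOf ['_', '_'] (c :: t) = true) := by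
          simpa [List.isPrefixOf_iff_prefix] using hp
        rw [if_neg hpre]
        have ht : t.length ≤ n := by simp at h; omega
        rw [ih _ _ ht, pvRep2_cons c t hp]
        simp

theorem pv_replace_toList (t : String) :
    (PySem.Str.replace t "__" "_").toList = pvRep2 t.toList := by
  rw [PySem.Str.toList_replace]
  rw [show ("__" : String).toList = ['_', '_'] from rfl, show ("_" : String).toList = ['_'] from rfl]
  rw [PySem.Chars.replace]
  simp only [List.isEmpty_iff, if_neg (by simp : ¬ (['_','_'] = [])), reduceCtorEq]
  rw [pv_go_rep2 _ _ _ le_rfl]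
  simp

theorem pvRep2_length_le (l : List Char) : (pvRep2 l).length ≤ l.length := by
  induction l using pvRep2.induct <;> simp [pvRep2, *] <;> omega

theorem pvRep2_length_lt (l : List Char) (h : ['_', '_'] <:+: l) :
    (pvRep2 l).length < l.length := by
  induction l using pvRep2.induct with
  | case1 => simp at h
  | case2 t ih =>
      have := pvRep2_length_le t
      simp [pvRep2]; omega
  | case3 c t hne ih =>
      rw [List.infix_cons_iff] at h
      rcases h with h | h
      · exfalso
        obtain ⟨u, hu⟩ := h
        simp [List.cons.injEq] at hu
        exact hne u hu.1.symm hu.2.symm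
      · have := ih h
        rw [pvRep2_cons]
        · simpa using this
        · intro hp
          obtain ⟨u, hu⟩ := hp
          simp [List.cons.injEq] at hu
          exact hne u hu.1.symm hu.2.symm

theorem pvCollapse_dec (t : String) (h : PySem.Str.isIn "__" t = true) :
    (PySem.Str.replace t "__" "_").toList.length < t.toList.length := by
  rw [pv_replace_toList]
  apply pvRep2_length_lt
  rw [PySem.Str.isIn_iff_infix] at h
  simpa using h

def pvReplaceCh (c : Char) : Char :=
  if ("-/\\= ;!+()".toList).contains c then '_' else c

def pvCheckCh (c : Char) : Bool :=
  let charnr := c.toNat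
  if ("._".toList).contains c then true
  else if 47 < charnr && charnr < 58 then true
  else if 96 < charnr && charnr < 123 then true
  else false

-- the 'while "__" in text: text = text.replace("__", "_")' loop
def pvCollapse (t : String) : String :=
  if h : PySem.Str.isIn "__" t = true then pvCollapse (PySem.Str.replace t "__" "_") else t
termination_by t.toList.length
decreasing_by exact pvCollapse_dec t h

-- exact port of str.rstrip("_"): drop trailing '_' characters
def pvRstripUnderscore (t : String) : String :=
  String.ofList ((t.toList.reverse.dropWhile (fun c => c == '_')).reverse)

def text_strip_to_ascii_dense (text : String) : String :=
  let t1 := PySem.Str.lower text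
  let t2 := PySem.Str.replace t1 "\n" ""
  let t3 := PySem.Str.replace t2 "\t" ""
  let t4 := PySem.Str.replace t3 " " ""
  let res := t4.toList.map pvReplaceCh
  let res2 := res.filter pvCheckCh
  let joined := String.ofList res2   -- "".join(res)
  pvRstripUnderscore (pvCollapse joined)

-- ===== PORT B =====
def pvAltKeep (ch : Char) : Bool :=
  ch == '.' || ('0' ≤ ch && ch ≤ '9') || ('a' ≤ ch && ch ≤ 'z')

def pvAltStep (out : List Char) (ch : Char) : List Char :=
  if ("\n\t ".toList).contains ch then out
  else if ch == '_' || ("-/\\=;!+()".toList).contains ch then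
    if out.getLast? != some '_' then out ++ ['_'] else out
  else if pvAltKeep ch then out ++ [ch] else out

def text_strip_to_ascii_dense_alt (text : String) : String :=
  pvRstripUnderscore (String.ofList ((PySem.Str.lower text).toList.foldl pvAltStep []))

-- ===== PRECONDITION & SPEC =====
def Spec_text_strip_to_ascii_dense (text : String) (out : String) : Prop := out = text_strip_to_ascii_dense_alt text
instance (text : String) (out : String) : Decidable (Spec_text_strip_to_ascii_dense text out) := by unfold Spec_text_strip_to_ascii_dense; infer_instance

-- ===== CLAIM (what is proved, stated in full; the proofs are below) =====
def Claim_equal_text_strip_to_ascii_dense : Prop := ∀ (text : String), Dom_text_strip_to_ascii_dense text → Spec_text_strip_to_ascii_dense text (text_strip_to_ascii_dense text)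

-- ===== LEMMAS AND PROOFS =====

-- squeeze runs of '_' to a single '_' (b says: the previous kept char was '_')
def pvSq (b : Bool) : List Char → List Char
  | [] => []
  | c :: t => if c = '_' then (if b then pvSq b t else '_' :: pvSq true t) else c :: pvSq false t

-- the filtered/mapped character stream both programs keep
def pvM (l : List Char) : List Char :=
  ((l.filter (fun c => !(("\n\t ".toList).contains c))).map pvReplaceCh).filter pvCheckCh

theorem pv_charA (c : Char)
    (h : (c == '_' || ("-/\\=;!+()".toList).contains c) = true) :
    pvReplaceCh c = '_' := by
  simp only [List.contains_eq_mem, decide_eq_true_eq, Bool.or_eq_true, beq_iff_eq] at h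
  rcases h with rfl | h
  · decide
  · rw [show ("-/\\=;!+()".toList) = ['-','/','\\','=',';','!','+','(',')'] from rfl] at h
    simp only [List.mem_cons, List.not_mem_nil, or_false] at h
    rcases h with rfl|rfl|rfl|rfl|rfl|rfl|rfl|rfl|rfl <;> decide

theorem pv_charB (c : Char) (hws : (("\n\t ".toList).contains c) = false)
    (h : (c == '_' || ("-/\\=;!+()".toList).contains c) = false) :
    pvReplaceCh c = c ∧ pvCheckCh c = pvAltKeep c := by
  simp only [List.contains_eq_mem, Bool.or_eq_false_iff, beq_eq_false_iff_ne, ne_eq,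
    decide_eq_false_iff_not] at h hws
  obtain ⟨hu, hB⟩ := h
  rw [show ("-/\\=;!+()".toList) = ['-','/','\\','=',';','!','+','(',')'] from rfl] at hB
  rw [show ("\n\t ".toList) = ['\n','\t',' '] from rfl] at hws
  simp only [List.mem_cons, List.not_mem_nil, or_false, not_or] at hB hws
  constructor
  · rw [pvReplaceCh, if_neg]
    rw [show ("-/\\= ;!+()".toList) = ['-','/','\\','=',' ',';','!','+','(',')'] from rfl]
    simp only [List.contains_eq_mem, List.mem_cons, List.not_mem_nil, or_false, not_or,
      decide_eq_true_eq]
    tauto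
  · by_cases hd : c = '.'
    · subst hd; decide
    · rw [pvCheckCh, pvAltKeep]
      rw [show ("._".toList) = ['.','_'] from rfl]
      have hmem : (['.','_'].contains c) = false := by
        simp only [List.contains_eq_mem, List.mem_cons, List.not_mem_nil, or_false,
          decide_eq_false_iff_not, not_or]
        exact ⟨hd, hu⟩
      rw [hmem]
      have h0 : decide ('0' ≤ c) = decide (48 ≤ c.toNat) := by
        apply decide_eq_decide.mpr; rw [Char.le_def, UInt32.le_iff_toNat_le]; rfl
      have h9 : decide (c ≤ '9') = decide (c.toNat ≤ 57) := by
        apply decide_eq_decide.mpr; rw [Char.le_def, UInt32.le_iff_toNat_le]; rfl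
      have ha : decide ('a' ≤ c) = decide (97 ≤ c.toNat) := by
        apply decide_eq_decide.mpr; rw [Char.le_def, UInt32.le_iff_toNat_le]; rfl
      have hz : decide (c ≤ 'z') = decide (c.toNat ≤ 122) := by
        apply decide_eq_decide.mpr; rw [Char.le_def, UInt32.le_iff_toNat_le]; rfl
      have hdot : (c == '.') = false := by simp [hd]
      simp only [Bool.false_eq_true, if_false, h0, h9, ha, hz, hdot, Bool.false_or]
      split_ifs with h1 h2 <;>
        (try simp only [Bool.and_eq_true, decide_eq_true_eq, not_and, not_lt] at h1) <;>
        (try simp only [Bool.and_eq_true, decide_eq_true_eq, not_and, not_lt] at h2) <;>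
        symm <;>
        first
          | (simp only [Bool.or_eq_true, Bool.and_eq_true, decide_eq_true_eq]; omega)
          | (simp only [Bool.or_eq_false_iff, Bool.and_eq_false_iff, decide_eq_false_iff_not,
               not_le]; omega)

theorem pv_foldl_alt (l acc : List Char) :
    l.foldl pvAltStep acc = acc ++ pvSq (acc.getLast? == some '_') (pvM l) := by
  induction l generalizing acc with
  | nil => simp [pvM, pvSq]
  | cons c t ih =>
    rw [List.foldl_cons, pvAltStep]
    by_cases hws : (("\n\t ".toList).contains c) = true
    · rw [if_pos hws]
      have hws' : c = '\n' ∨ c = '\t' ∨ c = ' ' := by simpa using hws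
      have hm : pvM (c :: t) = pvM t := by
        unfold pvM
        rw [List.filter_cons, if_neg (by simp; tauto)]
      rw [hm, ih]
    · rw [if_neg hws]
      rw [Bool.not_eq_true] at hws
      have hws' : ¬c = '\n' ∧ ¬c = '\t' ∧ ¬c = ' ' := by simpa using hws
      have hmk : pvM (c :: t) =
          (if pvCheckCh (pvReplaceCh c) then pvReplaceCh c :: pvM t else pvM t) := by
        unfold pvM
        rw [List.filter_cons, if_pos (by simp; tauto), List.map_cons, List.filter_cons]
      by_cases hb : (c == '_' || ("-/\\=;!+()".toList).contains c) = true
      · rw [if_pos hb]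
        have hrep := pv_charA c hb
        have hm : pvM (c :: t) = '_' :: pvM t := by
          rw [hmk, hrep]; simp [show pvCheckCh '_' = true from by decide]
        rw [hm]
        by_cases hl : acc.getLast? = some '_'
        · rw [if_neg (by simp [hl])]
          rw [ih acc]
          simp [pvSq, hl]
        · rw [if_pos (by simp [hl])]
          rw [ih (acc ++ ['_'])]
          have : (acc ++ ['_']).getLast? = some '_' := by simp
          rw [this]
          simp only [beq_self_eq_true, List.append_assoc, List.cons_append, List.nil_append]
          have hlb : (acc.getLast? == some '_') = false := by
            simp [hl]
          rw [hlb]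
          simp [pvSq]
      · rw [if_neg hb]
        obtain ⟨hrep, hchk⟩ := pv_charB c hws (by simpa using hb)
        have hcu : ¬ (c = '_') := by
          intro hc; subst hc; simp at hb
        by_cases hk : pvAltKeep c = true
        · rw [if_pos hk]
          have hm : pvM (c :: t) = c :: pvM t := by
            rw [hmk, hrep, hchk, if_pos hk]
          rw [hm, ih (acc ++ [c])]
          have : (acc ++ [c]).getLast? = some c := by simp
          rw [this]
          simp only [List.append_assoc, List.cons_append, List.nil_append]
          have : (some c == some '_') = false := by simp [hcu]
          rw [this]
          simp [pvSq, hcu]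
        · rw [if_neg hk]
          have hm : pvM (c :: t) = pvM t := by
            rw [hmk, hrep, hchk, if_neg hk]
          rw [hm, ih]

theorem pvSq_rep2 (l : List Char) (b : Bool) : pvSq b (pvRep2 l) = pvSq b l := by
  induction l using pvRep2.induct generalizing b with
  | case1 => rfl
  | case2 t ih =>
    cases b <;> simp [pvRep2, pvSq, ih]
  | case3 c t hne ih =>
    rw [pvRep2_cons c t]
    · by_cases hc : c = '_'
      · subst hc
        cases b <;> simp [pvSq, ih]
      · simp [pvSq, hc, ih]
    · intro hp
      obtain ⟨u, hu⟩ := hp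
      simp only [List.cons_append, List.nil_append, List.cons.injEq] at hu
      exact hne u hu.1.symm hu.2.symm

theorem pvSq_id (l : List Char) (b : Bool) (h : ¬ (['_', '_'] <:+: l))
    (hb : b = true → l.head? ≠ some '_') : pvSq b l = l := by
  induction l generalizing b with
  | nil => rfl
  | cons c t ih =>
    have hti : ¬ (['_', '_'] <:+: t) := fun ht => h (List.infix_cons ht)
    by_cases hc : c = '_'
    · subst hc
      have hbf : b = false := by
        cases b
        · rfl
        · exact absurd (show ('_' :: t).head? = some '_' from rfl) (hb rfl)
      subst hbf
      have hth : t.head? ≠ some '_' := by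
        intro hh
        apply h
        cases t with
        | nil => simp at hh
        | cons d u =>
          simp at hh
          subst hh
          exact ⟨[], u, rfl⟩
      have hstep : pvSq false ('_' :: t) = '_' :: pvSq true t := by simp [pvSq]
      rw [hstep, ih true hti (fun _ => hth)]
    · rw [pvSq]
      simp only [if_neg hc]
      rw [ih false hti (by simp)]

theorem pv_go_filter (a : Char) (fuel : Nat) (l acc : List Char) (h : l.length ≤ fuel) :
    PySem.Chars.replace.go [a] [] fuel l acc = acc.reverse ++ l.filter (fun c => c != a) := by
  induction fuel generalizing l acc with
  | zero =>
    have hl : l = [] := by cases l <;> simp_all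
    subst hl; simp [PySem.Chars.replace.go]
  | succ n ih =>
    cases l with
    | nil => simp [PySem.Chars.replace.go]
    | cons c t =>
      rw [PySem.Chars.replace.go]
      have ht : t.length ≤ n := by simp at h; omega
      by_cases hp : [a] <+: c :: t
      · obtain ⟨u, hu⟩ := hp
        simp only [List.cons_append, List.nil_append, List.cons.injEq] at hu
        obtain ⟨hc, _⟩ := hu
        subst hc
        have hpre : List.isPrefixOf [a] (a :: t) = true := by
          simp [List.isPrefixOf_iff_prefix]
        rw [if_pos hpre]
        rw [show (List.drop [a].length (a :: t)) = t from rfl]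
        rw [show (([] : List Char).reverse ++ acc) = acc from by simp]
        rw [ih _ _ ht]
        simp
      · have hca : ¬ (a = c) := by
          intro hc; subst hc; exact hp ⟨t, rfl⟩
        have hpre : ¬ (List.isPrefixOf [a] (c :: t) = true) := by
          simpa [List.isPrefixOf_iff_prefix] using hp
        rw [if_neg hpre]
        rw [ih _ _ ht]
        simp [List.filter_cons, Ne.symm hca, bne]

theorem pv_replace_del (t : String) (a : Char) (o : String) (ho : o.toList = [a]) :
    (PySem.Str.replace t o "").toList = t.toList.filter (fun c => c != a) := by
  rw [PySem.Str.toList_replace, ho]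
  rw [show ("" : String).toList = [] from rfl]
  rw [PySem.Chars.replace]
  simp only [List.isEmpty_iff, if_neg (by simp : ¬ ([a] = [])), reduceCtorEq]
  rw [pv_go_filter _ _ _ _ le_rfl]
  simp

theorem pvCollapse_ofList (s : List Char) :
    pvCollapse (String.ofList s) = String.ofList (pvSq false s) := by
  suffices hgen : ∀ (n : Nat) (s : List Char), s.length ≤ n →
      pvCollapse (String.ofList s) = String.ofList (pvSq false s) from
    hgen s.length s le_rfl
  intro n
  induction n with
  | zero =>
    intro s hs
    have : s = [] := by cases s <;> simp_all
    subst this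
    rw [pvCollapse]
    rw [dif_neg (by decide)]
    rfl
  | succ n ih =>
    intro s hs
    rw [pvCollapse]
    by_cases hin : PySem.Str.isIn "__" (String.ofList s) = true
    · rw [dif_pos hin]
      have hrepl : PySem.Str.replace (String.ofList s) "__" "_" = String.ofList (pvRep2 s) := by
        have := pv_replace_toList (String.ofList s)
        rw [String.toList_ofList] at this
        rw [PySem.Str.replace, String.toList_ofList]
        rw [show ("__" : String).toList = ['_', '_'] from rfl,
          show ("_" : String).toList = ['_'] from rfl]
        congr 1
        rw [PySem.Chars.replace, if_neg (by simp)]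
        rw [pv_go_rep2 _ _ _ le_rfl]
        simp
      rw [hrepl]
      have hinf : ['_', '_'] <:+: s := by
        rw [PySem.Str.isIn_iff_infix, String.toList_ofList] at hin
        simpa using hin
      have hlen : (pvRep2 s).length ≤ n := by
        have := pvRep2_length_lt s hinf
        omega
      rw [ih _ hlen, pvSq_rep2]
    · rw [dif_neg hin]
      have hninf : ¬ (['_', '_'] <:+: s) := by
        rw [PySem.Str.isIn_iff_infix, String.toList_ofList] at hin
        simpa using hin
      rw [pvSq_id s false hninf (by simp)]

theorem pv_filters_eq (l : List Char) :
    ((l.filter (fun c => c != '\n')).filter (fun c => c != '\t')).filter (fun c => c != ' ') =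
      l.filter (fun c => !(("\n\t ".toList).contains c)) := by
  rw [List.filter_filter, List.filter_filter]
  apply List.filter_congr
  intro c _
  rw [show ("\n\t ".toList) = ['\n', '\t', ' '] from rfl]
  by_cases h1 : c = '\n' <;> by_cases h2 : c = '\t' <;> by_cases h3 : c = ' ' <;>
    simp [h1, h2, h3]

-- ===== VERDICT (by name: the statement is the Claim_ definition above) =====
theorem text_strip_to_ascii_dense_spec : Claim_equal_text_strip_to_ascii_dense := by
  intro text _hdom
  unfold Spec_text_strip_to_ascii_dense
  unfold text_strip_to_ascii_dense text_strip_to_ascii_dense_alt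
  rw [pv_foldl_alt]
  simp only [List.nil_append, List.getLast?_nil]
  rw [show ((none : Option Char) == some '_') = false from rfl]
  rw [pvCollapse_ofList]
  rw [pv_replace_del _ ' ' " " rfl, pv_replace_del _ '\t' "\t" rfl,
    pv_replace_del _ '\n' "\n" rfl]
  rw [pv_filters_eq]
  unfold pvM
  rfl
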